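-- pv_equiv track=rewrite | github.com/Nordic-OG-Raven/FinSight | src/validation/validator.py | _group_by_period
-- ===== SOURCE A (Python) =====
-- from typing import List, Dict, Any, Optional
--
-- def _group_by_period(facts: List[Dict[str, Any]]) -> Dict[str, List[Dict[str, Any]]]:
--     """Group facts by reporting period"""
--     grouped = {}
--     for fact in facts:
--         period = fact.get('instant_date') or fact.get('period_end')
--         if period:
--             period_key = str(period)
--             if period_key not in grouped:
--                 grouped[period_key] = []
--             grouped[period_key].append(fact)
--     return grouped
-- ===== SOURCE B (Python) =====
-- def _period_key(fact):
--     period = fact.get('instant_date') or fact.get('period_end')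
--     return str(period) if period else None
--
-- def _group_by_period(facts):
--     keys = []
--     for fact in facts:
--         k = _period_key(fact)
--         if k is not None and k not in keys:
--             keys.append(k)
--     return {k: [f for f in facts if _period_key(f) == k] for k in keys}
-- ===== Notes on version B (the rewrite author's own statement) =====
-- stated objective: alternative
-- what changed: Replaces the single-pass incremental dict construction with a two-pass decomposition: first collect the period keys in first-occurrence order, then build each group with one comprehension filtering the facts by a shared key helper.
import Mathlib
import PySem

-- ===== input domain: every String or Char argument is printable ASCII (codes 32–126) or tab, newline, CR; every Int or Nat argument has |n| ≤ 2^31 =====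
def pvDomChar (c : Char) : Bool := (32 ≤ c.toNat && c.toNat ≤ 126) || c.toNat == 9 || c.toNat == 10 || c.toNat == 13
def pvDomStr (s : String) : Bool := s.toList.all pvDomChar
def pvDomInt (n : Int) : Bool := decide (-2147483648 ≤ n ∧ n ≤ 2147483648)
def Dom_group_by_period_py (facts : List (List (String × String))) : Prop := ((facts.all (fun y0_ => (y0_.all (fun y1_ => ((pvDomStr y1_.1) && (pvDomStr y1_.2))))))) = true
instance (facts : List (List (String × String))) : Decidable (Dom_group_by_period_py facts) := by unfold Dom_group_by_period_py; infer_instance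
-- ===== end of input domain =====

-- B groups in two passes (keys in first-occurrence order, then one filter per key) instead of A's incremental dict construction; same return value.

-- shared helper: `fact.get('instant_date') or fact.get('period_end')`, truthiness, str() — the key or none
def pvOptTruthy (o : Option String) : Bool :=
  match o with
  | some s => !(s == "")
  | none => false

def pvPeriodKey (fact : List (String × String)) : Option String :=
  let period := if pvOptTruthy ((PySem.Dict.mk fact).get? "instant_date")
                then (PySem.Dict.mk fact).get? "instant_date"
                else (PySem.Dict.mk fact).get? "period_end"
  if pvOptTruthy period then period else none

-- ===== PORT A =====
def group_by_period_py (facts : List (List (String × String))) : List (String × List (List (String × String))) :=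
  (facts.foldl (fun grouped fact =>
      match pvPeriodKey fact with
      | some period_key =>
          let g := if grouped.contains period_key then grouped else grouped.insert period_key []
          g.modify period_key [] (fun v => v ++ [fact])
      | none => grouped)
    (PySem.Dict.empty : PySem.Dict String (List (List (String × String))))).items

-- ===== PORT B =====
def group_by_period_py_alt (facts : List (List (String × String))) : List (String × List (List (String × String))) :=
  let keys := facts.foldl (fun ks fact =>
      match pvPeriodKey fact with
      | some k => if k ∈ ks then ks else ks ++ [k]
      | none => ks) []
  keys.map (fun k => (k, facts.filter (fun f => decide (pvPeriodKey f = some k))))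

-- ===== PRECONDITION & SPEC =====
def Spec_group_by_period_py (facts : List (List (String × String))) (out : List (String × List (List (String × String)))) : Prop := out = group_by_period_py_alt facts
instance (facts : List (List (String × String))) (out : List (String × List (List (String × String)))) : Decidable (Spec_group_by_period_py facts out) := by unfold Spec_group_by_period_py; infer_instance

-- ===== CLAIM (what is proved, stated in full; the proofs are below) =====
def Claim_equal_group_by_period_py : Prop := ∀ (facts : List (List (String × String))), Dom_group_by_period_py facts → Spec_group_by_period_py facts (group_by_period_py facts)

-- ===== LEMMAS AND PROOFS =====

-- keys of `l` not in `acc`, in first-occurrence order (proof-only notion)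
def pvNewK (acc : List String) : List (List (String × String)) → List String
  | [] => []
  | f :: r =>
    match pvPeriodKey f with
    | some k => if k ∈ acc then pvNewK acc r else k :: pvNewK (acc ++ [k]) r
    | none => pvNewK acc r

theorem pv_mem_newK {k' : String} {acc : List String} {l : List (List (String × String))}
    (h : k' ∈ pvNewK acc l) : k' ∉ acc := by
  induction l generalizing acc with
  | nil => simp [pvNewK] at h
  | cons f r ih =>
    simp only [pvNewK] at h
    cases hk : pvPeriodKey f with
    | none => exact ih (by simpa [hk] using h)
    | some k =>
      rw [hk] at h
      by_cases hm : k ∈ acc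
      · exact ih (by simpa [hm] using h)
      · simp [hm] at h
        rcases h with h | h
        · subst h; exact hm
        · intro hacc; exact (ih h) (by simp [hacc])

theorem pv_keysFold (l : List (List (String × String))) :
    ∀ acc : List String,
      l.foldl (fun ks fact =>
        match pvPeriodKey fact with
        | some k => if k ∈ ks then ks else ks ++ [k]
        | none => ks) acc = acc ++ pvNewK acc l := by
  induction l with
  | nil => intro acc; simp [pvNewK]
  | cons f r ih =>
    intro acc
    simp only [List.foldl_cons, pvNewK]
    cases hk : pvPeriodKey f with
    | none => simpa using ih acc
    | some k =>
      by_cases hm : k ∈ acc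
      · simpa [hm] using ih acc
      · simp only [hm, if_false]
        rw [ih (acc ++ [k])]
        simp

theorem pv_invA (l : List (List (String × String))) :
    ∀ d : PySem.Dict String (List (List (String × String))), d.keys.Nodup →
      (l.foldl (fun grouped fact =>
          match pvPeriodKey fact with
          | some period_key =>
              let g := if grouped.contains period_key then grouped else grouped.insert period_key []
              g.modify period_key [] (fun v => v ++ [fact])
          | none => grouped) d).items =
        d.items.map (fun kv => (kv.1, kv.2 ++ l.filter (fun f => decide (pvPeriodKey f = some kv.1))))
        ++ (pvNewK d.keys l).map (fun k => (k, l.filter (fun f => decide (pvPeriodKey f = some k)))) := by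
  induction l with
  | nil => intro d hnd; simp [pvNewK]
  | cons f r ih =>
    intro d hnd
    simp only [List.foldl_cons, pvNewK]
    cases hk : pvPeriodKey f with
    | none =>
      rw [ih d hnd]
      simp [hk]
    | some k =>
      by_cases hc : d.contains k = true
      · -- existing key: modify appends to the bucket of k
        simp only [hc, if_true]
        have hdm : d.modify k [] (fun v => v ++ [f]) = d.insert k (d.getD k [] ++ [f]) := rfl
        rw [hdm]
        have hkeys : (d.insert k (d.getD k [] ++ [f])).keys = d.keys := by
          rw [PySem.Dict.keys_insert_of_contains d _ hc]
        have hnd' : (d.insert k (d.getD k [] ++ [f])).keys.Nodup := by rw [hkeys]; exact hnd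
        rw [ih _ hnd', hkeys, PySem.Dict.items_insert_of_contains d _ hc, List.map_map]
        have hkmem : k ∈ d.keys := (PySem.Dict.contains_iff_mem_keys d k).mp hc
        congr 1
        · apply List.map_congr_left
          intro kv hkv
          by_cases he : kv.1 = k
          · have hv : d.getD kv.1 [] = kv.2 :=
              PySem.Dict.getD_of_mem_items d (by simpa using hkv) hnd []
            simp only [Function.comp, he, beq_self_eq_true, if_true]
            rw [he] at hv
            simp [hv, hk]
          · have : (kv.1 == k) = false := by simp [he]
            simp [Function.comp, this, hk, Ne.symm he]
        · rw [if_pos hkmem]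
          apply List.map_congr_left
          intro k' hk'
          have hne : k' ≠ k := fun h => (pv_mem_newK hk') (h ▸ hkmem)
          simp [hk, Ne.symm hne]
      · -- new key: insert [] then append
        have hcf : d.contains k = false := by simpa using hc
        simp only [hcf, Bool.false_eq_true, if_false]
        have hdm : (d.insert k []).modify k [] (fun v => v ++ [f]) = d.insert k [f] := by
          show (d.insert k []).insert k ((d.insert k []).getD k [] ++ [f]) = d.insert k [f]
          rw [PySem.Dict.getD_insert_self, PySem.Dict.insert_insert_self]
          rfl
        rw [hdm]
        have hkeys : (d.insert k [f]).keys = d.keys ++ [k] :=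
          PySem.Dict.keys_insert_of_not_contains d _ hcf
        have hnd' : (d.insert k [f]).keys.Nodup := PySem.Dict.nodup_keys_insert d k [f] hnd
        have hknm : k ∉ d.keys := fun h => by
          rw [(PySem.Dict.contains_iff_mem_keys d k).mpr h] at hcf; cases hcf
        rw [ih _ hnd', hkeys, PySem.Dict.items_insert_of_not_contains d _ hcf, if_neg hknm,
            List.map_append]
        rw [List.append_assoc]
        congr 1
        · apply List.map_congr_left
          intro kv hkv
          have hmem : kv.1 ∈ d.keys := by
            have : (kv.1, kv.2) ∈ d.items := by simpa using hkv
            exact PySem.Dict.mem_keys_of_mem_items d this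
          have hne : kv.1 ≠ k := fun h => hknm (h ▸ hmem)
          simp [hk, Ne.symm hne]
        · simp only [List.map_cons, List.map_nil, List.singleton_append, List.map_cons]
          congr 1
          · simp [hk]
          · apply List.map_congr_left
            intro k' hk'
            have hne : k' ≠ k := fun h => (pv_mem_newK hk') (by simp [h])
            simp [hk, Ne.symm hne]

-- ===== VERDICT (by name: the statement is the Claim_ definition above) =====
theorem group_by_period_py_spec : Claim_equal_group_by_period_py := by
  intro facts _
  unfold Spec_group_by_period_py group_by_period_py group_by_period_py_alt
  rw [pv_invA facts PySem.Dict.empty (by simp [pysem]), pv_keysFold]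
  simp [pysem, PySem.Dict.empty, PySem.Dict.keys]
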